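-- pv_equiv track=rewrite | github.com/LuisangelE-04/TIP102 | Unit-3/Session-1/Advanced-Set-1/2. reveal-attendee-list-in-order.py | reveal_attendee_list_in_order
-- ===== SOURCE A (Python) =====
-- from collections import deque
--
-- def reveal_attendee_list_in_order(attendees):
--   sorted_attendees = sorted(attendees)
--   arrangement = deque()
--
--   for num in reversed(sorted_attendees):
--     if arrangement:
--       arrangement.appendleft(arrangement.pop())
--
--     arrangement.appendleft(num)
--
--   return list(arrangement)
-- ===== SOURCE B (Python) =====
-- def reveal_attendee_list_in_order(attendees):
--     from collections import deque
--     sorted_attendees = sorted(attendees)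
--     n = len(sorted_attendees)
--     queue = deque(range(n))
--     result = [0] * n
--     for num in sorted_attendees:
--         pos = queue.popleft()
--         result[pos] = num
--         if queue:
--             queue.append(queue.popleft())
--     return result
-- ===== Notes on version B (the rewrite author's own statement) =====
-- stated objective: alternative
-- what changed: Instead of building the value deque backwards (largest first) with pop/appendleft rotations, B simulates the reveal forward: an index queue over range(n) picks the slot for each sorted value in increasing order and writes it into a preallocated result array.
import Mathlib
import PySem

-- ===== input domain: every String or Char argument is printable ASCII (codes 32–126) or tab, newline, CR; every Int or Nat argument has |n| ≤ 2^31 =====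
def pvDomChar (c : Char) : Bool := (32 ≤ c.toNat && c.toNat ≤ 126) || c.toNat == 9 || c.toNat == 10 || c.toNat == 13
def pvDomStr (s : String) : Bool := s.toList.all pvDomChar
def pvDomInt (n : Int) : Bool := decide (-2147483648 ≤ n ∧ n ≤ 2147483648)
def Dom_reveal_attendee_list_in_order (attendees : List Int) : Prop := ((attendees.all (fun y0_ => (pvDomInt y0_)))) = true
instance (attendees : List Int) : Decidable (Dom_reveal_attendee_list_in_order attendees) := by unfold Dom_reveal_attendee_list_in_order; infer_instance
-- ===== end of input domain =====

-- B replaces A's backwards value-deque construction (pop/appendleft rotations, largest value first)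
-- by a forward simulation: an index queue over range(n) assigns a slot to each sorted value in
-- increasing order, writing into a preallocated result array (objective: alternative, same cost).

-- ===== PORT A =====
-- arrangement.appendleft(arrangement.pop()) — move the back element to the front (no-op guard
-- handled at the call site, as in the Python)
def pvMoveBackFront {α : Type} (arr : List α) : List α :=
  match arr.getLast? with
  | some a => a :: arr.dropLast
  | none => arr

def reveal_attendee_list_in_order (attendees : List Int) : List Int :=
  let sorted_attendees := PySem.List.sorted attendees (fun x => x) false
  let arrangement := sorted_attendees.reverse.foldl
    (fun arrangement num =>
      let arrangement := if arrangement.isEmpty then arrangement else pvMoveBackFront arrangement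
      num :: arrangement) ([] : List Int)
  arrangement

-- ===== PORT B =====
-- queue.append(queue.popleft()) when the queue is non-empty — rotate front to back
def pvRotate {α : Type} : List α → List α
  | [] => []
  | a :: as => as ++ [a]

-- the for-loop of Source B: for each sorted value, pos = queue.popleft(); result[pos] = num;
-- then rotate the remaining queue (the [] queue branch is unreachable: queue outlives the values)
def pvFillLoop : List Int → List Nat → List Int → List Int
  | [], _, result => result
  | _ :: _, [], result => result
  | num :: rest, pos :: queue, result => pvFillLoop rest (pvRotate queue) (result.set pos num)

def reveal_attendee_list_in_order_alt (attendees : List Int) : List Int :=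
  let sorted_attendees := PySem.List.sorted attendees (fun x => x) false
  let n := sorted_attendees.length
  pvFillLoop sorted_attendees (List.range n) (List.replicate n 0)

-- ===== PRECONDITION & SPEC =====
def Spec_reveal_attendee_list_in_order (attendees : List Int) (out : List Int) : Prop := out = reveal_attendee_list_in_order_alt attendees
instance (attendees : List Int) (out : List Int) : Decidable (Spec_reveal_attendee_list_in_order attendees out) := by unfold Spec_reveal_attendee_list_in_order; infer_instance

-- ===== CLAIM (what is proved, stated in full; the proofs are below) =====
def Claim_equal_reveal_attendee_list_in_order : Prop := ∀ (attendees : List Int), Dom_reveal_attendee_list_in_order attendees → Spec_reveal_attendee_list_in_order attendees (reveal_attendee_list_in_order attendees)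

-- ===== LEMMAS AND PROOFS =====

theorem pvRotate_length {α : Type} (l : List α) : (pvRotate l).length = l.length := by
  cases l <;> simp [pvRotate]

-- the reveal order: read the front, rotate the rest, repeat
def pvRseq {α : Type} : List α → List α
  | [] => []
  | a :: q => a :: pvRseq (pvRotate q)
termination_by l => l.length
decreasing_by simp [pvRotate_length]

theorem pvMoveBackFront_rotate {α : Type} (l : List α) : pvMoveBackFront (pvRotate l) = l := by
  cases l with
  | nil => rfl
  | cons a as => simp [pvRotate, pvMoveBackFront]

theorem pvRotate_moveBackFront {α : Type} (l : List α) : pvRotate (pvMoveBackFront l) = l := by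
  cases h : l.getLast? with
  | none => simp [List.getLast?_eq_none_iff] at h; simp [h, pvMoveBackFront, pvRotate]
  | some a =>
    rw [List.getLast?_eq_some_iff] at h
    obtain ⟨ys, rfl⟩ := h
    simp [pvMoveBackFront, pvRotate]

theorem pvMoveBackFront_length {α : Type} (l : List α) : (pvMoveBackFront l).length = l.length := by
  have := pvRotate_length (pvMoveBackFront l)
  rw [pvRotate_moveBackFront] at this
  omega

theorem pvRotate_map {α β : Type} (f : α → β) (l : List α) :
    pvRotate (l.map f) = (pvRotate l).map f := by
  cases l <;> simp [pvRotate]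

theorem pvRseq_map {α β : Type} (f : α → β) (l : List α) :
    pvRseq (l.map f) = (pvRseq l).map f := by
  match l with
  | [] => simp [pvRseq]
  | a :: q =>
    rw [List.map_cons]
    simp only [pvRseq]
    rw [pvRotate_map, pvRseq_map f (pvRotate q), List.map_cons]
termination_by l.length
decreasing_by simp [pvRotate_length]

theorem pvRseq_length {α : Type} (l : List α) : (pvRseq l).length = l.length := by
  match l with
  | [] => simp [pvRseq]
  | a :: q =>
    simp only [pvRseq, List.length_cons]
    rw [pvRseq_length (pvRotate q), pvRotate_length]
termination_by l.length
decreasing_by simp [pvRotate_length]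

theorem pvRotate_perm {α : Type} (l : List α) : (pvRotate l).Perm l := by
  cases l with
  | nil => exact List.Perm.refl _
  | cons a as => simpa [pvRotate] using (List.perm_append_singleton a as)

theorem pvRseq_perm {α : Type} (l : List α) : (pvRseq l).Perm l := by
  match l with
  | [] => simp [pvRseq]
  | a :: q =>
    simp only [pvRseq]
    exact ((pvRseq_perm (pvRotate q)).trans (pvRotate_perm q)).cons a
termination_by l.length
decreasing_by simp [pvRotate_length]

theorem pvRseq_inj {α : Type} (l1 l2 : List α) (hlen : l1.length = l2.length)
    (h : pvRseq l1 = pvRseq l2) : l1 = l2 := by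
  match l1, l2 with
  | [], [] => rfl
  | [], _ :: _ => simp at hlen
  | _ :: _, [] => simp at hlen
  | a :: q1, b :: q2 =>
    simp only [pvRseq, List.cons.injEq] at h
    obtain ⟨rfl, h2⟩ := h
    have hl : (pvRotate q1).length = (pvRotate q2).length := by
      simp only [pvRotate_length]; simp at hlen ⊢; omega
    have := pvRseq_inj (pvRotate q1) (pvRotate q2) hl h2
    have := congrArg pvMoveBackFront this
    simp only [pvMoveBackFront_rotate] at this
    simp [this]
termination_by l1.length
decreasing_by simp [pvRotate_length]

-- A's loop as structural recursion on the (ascending) sorted list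
def pvGA : List Int → List Int
  | [] => []
  | x :: xs => x :: pvMoveBackFront (pvGA xs)

theorem portA_eq (s : List Int) :
    s.reverse.foldl
      (fun arrangement num =>
        let arrangement := if arrangement.isEmpty then arrangement else pvMoveBackFront arrangement
        num :: arrangement) ([] : List Int) = pvGA s := by
  rw [List.foldl_reverse]
  induction s with
  | nil => rfl
  | cons x xs ih =>
    simp only [List.foldr_cons, ih, pvGA]
    cases h : pvGA xs with
    | nil => simp [pvMoveBackFront]
    | cons a as => simp

theorem pvGA_length (s : List Int) : (pvGA s).length = s.length := by
  induction s with
  | nil => rfl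
  | cons x xs ih => simp [pvGA, pvMoveBackFront_length, ih]

theorem pvRseq_pvGA (s : List Int) : pvRseq (pvGA s) = s := by
  induction s with
  | nil => simp [pvGA, pvRseq]
  | cons x xs ih =>
    simp only [pvGA, pvRseq, pvRotate_moveBackFront, ih]

def pvWriteAll (l : List (Nat × Int)) (r : List Int) : List Int :=
  l.foldl (fun r pv => r.set pv.1 pv.2) r

theorem pvWriteAll_length (l : List (Nat × Int)) (r : List Int) :
    (pvWriteAll l r).length = r.length := by
  induction l generalizing r with
  | nil => rfl
  | cons pv l ih => simp [pvWriteAll, List.foldl_cons] at *; simp [ih]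

theorem pvFillLoop_eq (s : List Int) (q : List Nat) (r : List Int) :
    pvFillLoop s q r = pvWriteAll ((pvRseq q).zip s) r := by
  induction s generalizing q r with
  | nil => simp [pvFillLoop, pvWriteAll]
  | cons v vs ih =>
    cases q with
    | nil => simp [pvFillLoop, pvRseq, pvWriteAll]
    | cons p q' =>
      simp only [pvFillLoop, pvRseq, List.zip_cons_cons, pvWriteAll, List.foldl_cons]
      exact ih (pvRotate q') (r.set p v)

theorem pvWriteAll_untouched (ps : List Nat) (vs : List Int) (r : List Int) (p : Nat)
    (hp : p ∉ ps) : (pvWriteAll (ps.zip vs) r).getD p 0 = r.getD p 0 := by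
  induction ps generalizing vs r with
  | nil => rfl
  | cons q qs ih =>
    cases vs with
    | nil => rfl
    | cons v vs' =>
      simp only [List.zip_cons_cons, pvWriteAll, List.foldl_cons]
      have hpq : p ≠ q := fun h => hp (h ▸ List.mem_cons_self ..)
      have hps : p ∉ qs := fun h => hp (List.mem_cons_of_mem _ h)
      have h1 := ih vs' (r.set q v) hps
      simp only [pvWriteAll] at h1
      rw [h1]
      simp [List.getD, List.getElem?_set_ne (fun h => hpq h.symm)]

theorem pvRead_writeAll (ps : List Nat) (vs : List Int) (r : List Int)
    (hnd : ps.Nodup) (hlen : ps.length = vs.length) (hb : ∀ p ∈ ps, p < r.length) :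
    ps.map (fun p => (pvWriteAll (ps.zip vs) r).getD p 0) = vs := by
  induction ps generalizing vs r with
  | nil => cases vs with
    | nil => rfl
    | cons _ _ => simp at hlen
  | cons p ps' ih =>
    cases vs with
    | nil => simp at hlen
    | cons v vs' =>
      simp only [List.zip_cons_cons, pvWriteAll, List.foldl_cons, List.map_cons]
      rw [List.nodup_cons] at hnd
      have hplen : p < r.length := hb p (List.mem_cons_self ..)
      have head : (pvWriteAll (ps'.zip vs') (r.set p v)).getD p 0 = v := by
        rw [pvWriteAll_untouched ps' vs' (r.set p v) p hnd.1]
        simp [List.getD, hplen]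
      have tail := ih vs' (r.set p v) hnd.2 (by simpa using hlen)
        (fun q hq => by simpa using hb q (List.mem_cons_of_mem _ hq))
      simp only [pvWriteAll] at head tail ⊢
      rw [head, tail]

theorem pvMap_getD_range (r : List Int) :
    (List.range r.length).map (fun p => r.getD p 0) = r := by
  apply List.ext_getElem
  · simp
  · intro i h1 h2
    simp only [List.getElem_map, List.getElem_range]
    rw [List.getD_eq_getElem r 0 h2]

theorem pvMain (s : List Int) :
    pvGA s = pvFillLoop s (List.range s.length) (List.replicate s.length 0) := by
  set n := s.length with hn
  set ps := pvRseq (List.range n) with hps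
  have hfill : pvFillLoop s (List.range n) (List.replicate n 0)
      = pvWriteAll (ps.zip s) (List.replicate n 0) := pvFillLoop_eq s _ _
  set r' := pvWriteAll (ps.zip s) (List.replicate n 0) with hr'
  have hr'len : r'.length = n := by
    rw [hr', pvWriteAll_length]; simp
  have hpsnd : ps.Nodup := ((pvRseq_perm (List.range n)).nodup_iff).mpr (List.nodup_range)
  have hpslen : ps.length = s.length := by rw [hps, pvRseq_length, List.length_range]
  have hpsb : ∀ p ∈ ps, p < (List.replicate n 0 : List Int).length := by
    intro p hp
    have : p ∈ List.range n := (pvRseq_perm (List.range n)).mem_iff.mp hp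
    simpa using List.mem_range.mp this
  have hread : pvRseq r' = s := by
    have h1 : (List.range r'.length).map (fun p => r'.getD p 0) = r' := pvMap_getD_range r'
    have h2 : pvRseq r' = ps.map (fun p => r'.getD p 0) := by
      conv_lhs => rw [← h1]
      rw [pvRseq_map, hr'len]
    rw [h2, hr']
    exact pvRead_writeAll ps s (List.replicate n 0) hpsnd hpslen hpsb
  have hga : pvRseq (pvGA s) = s := pvRseq_pvGA s
  have hlen : (pvGA s).length = r'.length := by rw [pvGA_length, hr'len]
  rw [hfill]
  exact pvRseq_inj (pvGA s) r' hlen (by rw [hga, hread])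

-- ===== VERDICT (by name: the statement is the Claim_ definition above) =====
theorem reveal_attendee_list_in_order_spec : Claim_equal_reveal_attendee_list_in_order := by
  intro attendees _
  unfold Spec_reveal_attendee_list_in_order reveal_attendee_list_in_order reveal_attendee_list_in_order_alt
  simp only []
  rw [portA_eq, pvMain]
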